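-- pv_equiv track=rewrite | github.com/flutter/flutter | third_party/cython/src/Cython/Compiler/MemoryView.py | is_cf_contig
-- ===== SOURCE A (Python) =====
-- def all(it):
--     for item in it:
--         if not item:
--             return False
--     return True
--
-- def is_cf_contig(specs):
--     is_c_contig = is_f_contig = False
--
--     if (len(specs) == 1 and specs == [('direct', 'contig')]):
--         is_c_contig = True
--
--     elif (specs[-1] == ('direct','contig') and
--           all([axis == ('direct','follow') for axis in specs[:-1]])):
--         # c_contiguous: 'follow', 'follow', ..., 'follow', 'contig'
--         is_c_contig = True
--
--     elif (len(specs) > 1 and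
--         specs[0] == ('direct','contig') and
--         all([axis == ('direct','follow') for axis in specs[1:]])):
--         # f_contiguous: 'contig', 'follow', 'follow', ..., 'follow'
--         is_f_contig = True
--
--     return is_c_contig, is_f_contig
-- ===== SOURCE B (Python) =====
-- def is_cf_contig(specs):
--     n = len(specs)
--     is_c_contig = specs == [('direct', 'follow')] * (n - 1) + [('direct', 'contig')]
--     is_f_contig = n > 1 and specs == [('direct', 'contig')] + [('direct', 'follow')] * (n - 1)
--     return is_c_contig, is_f_contig
-- ===== Notes on version B (the rewrite author's own statement) =====
-- stated objective: simpler
-- what changed: Replaces the three-branch if/elif chain with element-wise all() scans over slices by constructing the two expected spec patterns (replicated 'follow' plus one 'contig') and testing whole-list equality once each.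
import Mathlib
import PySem

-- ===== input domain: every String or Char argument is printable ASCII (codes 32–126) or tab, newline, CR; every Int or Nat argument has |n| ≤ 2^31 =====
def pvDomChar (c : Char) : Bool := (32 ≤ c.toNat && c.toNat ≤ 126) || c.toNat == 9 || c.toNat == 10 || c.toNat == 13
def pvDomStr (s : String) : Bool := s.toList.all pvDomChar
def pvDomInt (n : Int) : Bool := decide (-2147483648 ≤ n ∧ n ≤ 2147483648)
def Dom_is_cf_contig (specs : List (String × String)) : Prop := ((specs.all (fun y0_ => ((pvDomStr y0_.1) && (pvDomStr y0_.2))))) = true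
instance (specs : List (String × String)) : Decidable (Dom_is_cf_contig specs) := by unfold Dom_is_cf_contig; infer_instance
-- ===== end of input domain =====

-- B replaces A's if/elif chain and element-wise all() scans by building the two expected
-- pattern lists and testing whole-list equality (objective: simpler).

-- ===== PORT A =====
-- the module-level helper 'all' of A
def pvAll : List Bool → Bool
  | [] => true
  | b :: rest => if !b then false else pvAll rest

def is_cf_contig (specs : List (String × String)) : Bool × Bool :=
  if specs.length == 1 && specs == [(("direct" : String), ("contig" : String))] then
    (true, false)
  else if (PySem.List.pyGet? specs (-1) == some (("direct" : String), ("contig" : String))) &&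
          pvAll ((PySem.List.slice specs none (some (-1))).map
            (fun axis => axis == (("direct" : String), ("follow" : String)))) then
    (true, false)
  else if decide (specs.length > 1) &&
          (PySem.List.pyGet? specs 0 == some (("direct" : String), ("contig" : String))) &&
          pvAll ((PySem.List.slice specs (some 1) none).map
            (fun axis => axis == (("direct" : String), ("follow" : String)))) then
    (false, true)
  else
    (false, false)

-- ===== PORT B =====
def is_cf_contig_alt (specs : List (String × String)) : Bool × Bool :=
  let n := specs.length
  let is_c_contig :=
    specs == List.replicate (n - 1) (("direct" : String), ("follow" : String)) ++
             [(("direct" : String), ("contig" : String))]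
  let is_f_contig :=
    decide (n > 1) &&
    (specs == (("direct" : String), ("contig" : String)) ::
              List.replicate (n - 1) (("direct" : String), ("follow" : String)))
  (is_c_contig, is_f_contig)

-- ===== PRECONDITION & SPEC =====
-- A evaluates specs[-1] whenever the first branch fails, so it raises IndexError on [].
def Pre_is_cf_contig (specs : List (String × String)) : Prop := specs ≠ []
instance (specs : List (String × String)) : Decidable (Pre_is_cf_contig specs) := by
  unfold Pre_is_cf_contig; infer_instance

def pvWitness_is_cf_contig : (List (String × String)) := [("direct", "contig")]

def Spec_is_cf_contig (specs : List (String × String)) (out : Bool × Bool) : Prop :=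
  out = is_cf_contig_alt specs
instance (specs : List (String × String)) (out : Bool × Bool) : Decidable (Spec_is_cf_contig specs out) := by
  unfold Spec_is_cf_contig; infer_instance

-- ===== CLAIM (what is proved, stated in full; the proofs are below) =====
def Claim_equal_is_cf_contig : Prop := ∀ (specs : List (String × String)), Dom_is_cf_contig specs → Pre_is_cf_contig specs → Spec_is_cf_contig specs (is_cf_contig specs)

-- ===== LEMMAS AND PROOFS =====

-- A's element-wise scan 'all([axis == f for axis in l])' spells out to 'l is f repeated'.
theorem pvAll_map_eq_replicate (f : String × String) (l : List (String × String)) :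
    pvAll (l.map (fun a => a == f)) = (l == List.replicate l.length f) := by
  induction l with
  | nil => rfl
  | cons h t ih =>
      by_cases hh : h = f
      · simp [pvAll, hh, List.replicate_succ, ih]
      · simp [pvAll, hh, List.replicate_succ]

theorem is_cf_contig_eq_alt (l : List (String × String)) (x : String × String) :
    is_cf_contig (l ++ [x]) = is_cf_contig_alt (l ++ [x]) := by
  unfold is_cf_contig is_cf_contig_alt
  simp only [PySem.List.pyGet?_neg_one_append_singleton, PySem.List.slice_to_neg_one,
    List.dropLast_concat, pvAll_map_eq_replicate, PySem.List.slice_from_one,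
    List.length_append, List.length_singleton, Nat.add_sub_cancel]
  cases l with
  | nil =>
      by_cases hx : x = (("direct" : String), ("contig" : String)) <;>
        simp [hx, beq_eq_decide]
  | cons h t =>
      simp only [List.cons_append, List.tail_cons, PySem.List.pyGet?_zero_cons,
        List.length_cons, List.length_append]
      -- scalar condition pieces
      have r1 : ((t.length + 1 + 1 : Nat) == 1) = false := by simp
      have r2 : ((some x == some (("direct" : String), ("contig" : String))) : Bool) =
          (x == (("direct" : String), ("contig" : String))) := by
        simp [beq_eq_decide]
      have r3 : ((some h == some (("direct" : String), ("contig" : String))) : Bool) =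
          (h == (("direct" : String), ("contig" : String))) := by
        simp [beq_eq_decide]
      -- B's whole-list tests split into A's per-branch atoms
      have eA1 : ((h :: (t ++ [x]) : List (String × String)) ==
            List.replicate (t.length + 1) (("direct" : String), ("follow" : String)) ++
              [(("direct" : String), ("contig" : String))]) =
          ((h :: t == List.replicate (t.length + 1) (("direct" : String), ("follow" : String))) &&
            (x == (("direct" : String), ("contig" : String)))) := by
        simp only [beq_eq_decide, ← Bool.decide_and]
        apply decide_eq_decide.mpr
        rw [← List.cons_append]
        constructor
        · intro he
          have := List.append_inj he (by simp)
          exact ⟨this.1, by simpa using this.2⟩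
        · rintro ⟨h1, h2⟩
          rw [h1, h2]
      have eA2 : ((h :: (t ++ [x]) : List (String × String)) ==
            (("direct" : String), ("contig" : String)) ::
              List.replicate (t.length + 1) (("direct" : String), ("follow" : String))) =
          ((h == (("direct" : String), ("contig" : String))) &&
            ((t ++ [x] : List (String × String)) ==
              List.replicate (t.length + 1) (("direct" : String), ("follow" : String)))) := by
        simp only [beq_eq_decide, ← Bool.decide_and]
        apply decide_eq_decide.mpr
        simp
      -- the c-pattern and the f-pattern cannot hold at once (x would be both values)
      have excl : (x == (("direct" : String), ("contig" : String))) = true →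
          ((t ++ [x] : List (String × String)) ==
            List.replicate (t.length + 1) (("direct" : String), ("follow" : String))) = true →
          False := by
        intro p q
        have hp : x = (("direct" : String), ("contig" : String)) := by simpa using p
        have hq : t ++ [x] =
            List.replicate t.length (("direct" : String), ("follow" : String)) ++
              [(("direct" : String), ("follow" : String))] := by
          rw [← List.replicate_succ']; simpa using q
        have := List.append_inj hq (by simp)
        have hx2 : x = (("direct" : String), ("follow" : String)) := by simpa using this.2
        rw [hp] at hx2
        exact absurd hx2 (by decide)
      simp only [r1, r2, r3, eA1, eA2, List.length_nil, Bool.false_and]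
      rw [if_neg Bool.false_ne_true]
      revert excl
      generalize (x == (("direct" : String), ("contig" : String))) = a1
      generalize ((h :: t : List (String × String)) ==
        List.replicate (t.length + 1) (("direct" : String), ("follow" : String))) = a2
      generalize (h == (("direct" : String), ("contig" : String))) = a3
      generalize ((t ++ [x] : List (String × String)) ==
        List.replicate (t.length + 1) (("direct" : String), ("follow" : String))) = a4
      intro excl
      cases a1 <;> cases a2 <;> cases a3 <;> cases a4 <;> simp_all

-- ===== VERDICT (by name: the statement is the Claim_ definition above) =====
theorem is_cf_contig_spec : Claim_equal_is_cf_contig := by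
  intro specs _ hpre
  unfold Spec_is_cf_contig
  obtain ⟨l, x, rfl⟩ := (List.eq_nil_or_concat specs).resolve_left hpre
  simpa [List.concat_eq_append] using is_cf_contig_eq_alt l x
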